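-- pv_equiv track=rewrite | github.com/bvarici/TMLR-mixture-DAG | utils.py | find_unshielded_triples
-- ===== SOURCE A (Python) =====
-- def find_unshielded_triples(adjacency_matrix):
--     unshielded_triples = []
--     num_nodes = len(adjacency_matrix)
--
--     for node in range(num_nodes):
--         for u in range(num_nodes):
--             for v in range(num_nodes):
--                 if u != v and adjacency_matrix[u][v] == 0 and adjacency_matrix[node][u] == 1 and adjacency_matrix[node][v] == 1:
--                     unshielded_triples.append((u,node, v))
--
--     return unshielded_triples
-- ===== SOURCE B (Python) =====
-- def find_unshielded_triples(adjacency_matrix):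
--     n = len(adjacency_matrix)
--     # neighbor list of each node: columns (in increasing order) holding a 1
--     neighbors = [[j for j in range(n) if adjacency_matrix[i][j] == 1] for i in range(n)]
--     triples = []
--     for node in range(n):
--         nbrs = neighbors[node]
--         for u in nbrs:
--             for v in nbrs:
--                 if u != v and adjacency_matrix[u][v] == 0:
--                     triples.append((u, node, v))
--     return triples
-- ===== Notes on version B (the rewrite author's own statement) =====
-- stated objective: faster
-- what changed: B precomputes each node's neighbor list once and then iterates only over ordered pairs of neighbors of each node (checking non-adjacency), instead of A's triple nested loop over all node/u/v index combinations.
-- outside the precondition, e.g. on find_unshielded_triples([[]]): A returns [], B raises IndexError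
import Mathlib
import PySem

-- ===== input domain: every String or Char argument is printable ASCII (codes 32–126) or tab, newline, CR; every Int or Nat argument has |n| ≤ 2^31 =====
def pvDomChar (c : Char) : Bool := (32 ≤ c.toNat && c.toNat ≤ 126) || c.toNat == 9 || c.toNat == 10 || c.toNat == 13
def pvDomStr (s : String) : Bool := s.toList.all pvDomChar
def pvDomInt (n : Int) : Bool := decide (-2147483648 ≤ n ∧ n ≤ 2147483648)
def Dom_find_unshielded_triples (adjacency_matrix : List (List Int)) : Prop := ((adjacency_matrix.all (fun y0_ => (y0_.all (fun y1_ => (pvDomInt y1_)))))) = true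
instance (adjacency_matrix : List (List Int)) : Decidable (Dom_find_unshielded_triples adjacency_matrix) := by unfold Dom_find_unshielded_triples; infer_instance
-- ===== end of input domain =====

-- B replaces A's triple loop over all (node,u,v) by precomputed neighbor lists and a loop
-- over ordered neighbor pairs only (objective: faster; same output, same order).

-- shared indexing helper: adjacency_matrix[i][j]; exact on Pre_ (all indices used are in range)
def pvEntry (m : List (List Int)) (i j : Int) : Int :=
  PySem.List.pyGetD (PySem.List.pyGetD m i []) j 0

-- ===== PORT A =====
def find_unshielded_triples (adjacency_matrix : List (List Int)) : List (Int × Int × Int) :=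
  let num_nodes : Int := adjacency_matrix.length
  (PySem.List.pyRange 0 num_nodes 1).foldl (fun acc node =>
    (PySem.List.pyRange 0 num_nodes 1).foldl (fun acc u =>
      (PySem.List.pyRange 0 num_nodes 1).foldl (fun acc v =>
        if u ≠ v ∧ pvEntry adjacency_matrix u v = 0 ∧
            pvEntry adjacency_matrix node u = 1 ∧ pvEntry adjacency_matrix node v = 1 then
          acc ++ [(u, node, v)]
        else acc) acc) acc) []

-- ===== PORT B =====
def find_unshielded_triples_alt (adjacency_matrix : List (List Int)) : List (Int × Int × Int) :=
  let n : Int := adjacency_matrix.length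
  let neighbors : List (List Int) :=
    (PySem.List.pyRange 0 n 1).map (fun i =>
      (PySem.List.pyRange 0 n 1).filter (fun j => pvEntry adjacency_matrix i j == 1))
  (PySem.List.pyRange 0 n 1).foldl (fun acc node =>
    let nbrs := PySem.List.pyGetD neighbors node []
    nbrs.foldl (fun acc u =>
      nbrs.foldl (fun acc v =>
        if u ≠ v ∧ pvEntry adjacency_matrix u v = 0 then
          acc ++ [(u, node, v)]
        else acc) acc) acc) []

-- ===== PRECONDITION & SPEC =====
-- Pre_ excludes ragged matrices (some row shorter than the matrix): there A either raises
-- IndexError or (only in the degenerate one-row-with-empty-row case, cited in the claim)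
-- returns an empty result while B raises IndexError.
def Pre_find_unshielded_triples (adjacency_matrix : List (List Int)) : Prop :=
  ∀ row ∈ adjacency_matrix, adjacency_matrix.length ≤ row.length
instance (adjacency_matrix : List (List Int)) : Decidable (Pre_find_unshielded_triples adjacency_matrix) := by unfold Pre_find_unshielded_triples; infer_instance
def pvWitness_find_unshielded_triples : List (List Int) := [[0, 1, 1], [1, 0, 0], [1, 0, 0]]

def Spec_find_unshielded_triples (adjacency_matrix : List (List Int)) (out : List (Int × Int × Int)) : Prop := out = find_unshielded_triples_alt adjacency_matrix
instance (adjacency_matrix : List (List Int)) (out : List (Int × Int × Int)) : Decidable (Spec_find_unshielded_triples adjacency_matrix out) := by unfold Spec_find_unshielded_triples; infer_instance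

-- ===== CLAIM (what is proved, stated in full; the proofs are below) =====
def Claim_equal_find_unshielded_triples : Prop := ∀ (adjacency_matrix : List (List Int)), Dom_find_unshielded_triples adjacency_matrix → Pre_find_unshielded_triples adjacency_matrix → Spec_find_unshielded_triples adjacency_matrix (find_unshielded_triples adjacency_matrix)

-- ===== LEMMAS AND PROOFS =====

theorem pv_flatMap_ite {α β : Type} (l : List α) (p : α → Prop) [DecidablePred p] (f : α → List β) :
    l.flatMap (fun x => if p x then f x else []) = (l.filter (fun x => decide (p x))).flatMap f := by
  induction l with
  | nil => simp
  | cons a t ih => by_cases h : p a <;> simp [h, ih]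

theorem pv_inner_eq (m : List (List Int)) (node : Int) :
    (PySem.List.pyRange 0 (m.length : Int) 1).flatMap (fun u =>
      ((PySem.List.pyRange 0 (m.length : Int) 1).filter (fun v =>
        decide (u ≠ v ∧ pvEntry m u v = 0 ∧ pvEntry m node u = 1 ∧ pvEntry m node v = 1))).map
        (fun v => (u, node, v)))
    = ((PySem.List.pyRange 0 (m.length : Int) 1).filter (fun j => pvEntry m node j == 1)).flatMap
        (fun u =>
          (((PySem.List.pyRange 0 (m.length : Int) 1).filter (fun j => pvEntry m node j == 1)).filter
            (fun v => decide (u ≠ v ∧ pvEntry m u v = 0))).map (fun v => (u, node, v))) := by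
  have step1 : ∀ u : Int, ((PySem.List.pyRange 0 (m.length : Int) 1).filter (fun v =>
        decide (u ≠ v ∧ pvEntry m u v = 0 ∧ pvEntry m node u = 1 ∧ pvEntry m node v = 1))).map
        (fun v => (u, node, v))
      = if pvEntry m node u = 1 then
          (((PySem.List.pyRange 0 (m.length : Int) 1).filter (fun j => pvEntry m node j == 1)).filter
            (fun v => decide (u ≠ v ∧ pvEntry m u v = 0))).map (fun v => (u, node, v))
        else [] := by
    intro u
    by_cases h : pvEntry m node u = 1
    · simp only [h, if_pos, List.filter_filter]
      apply congrArg
      apply List.filter_congr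
      intro v _
      by_cases h4 : pvEntry m node v = 1 <;> by_cases h1 : u = v <;>
        by_cases h2 : pvEntry m u v = 0 <;> simp [h1, h2, h4]
    · simp [h]
  calc (PySem.List.pyRange 0 (m.length : Int) 1).flatMap (fun u =>
      ((PySem.List.pyRange 0 (m.length : Int) 1).filter (fun v =>
        decide (u ≠ v ∧ pvEntry m u v = 0 ∧ pvEntry m node u = 1 ∧ pvEntry m node v = 1))).map
        (fun v => (u, node, v)))
      = (PySem.List.pyRange 0 (m.length : Int) 1).flatMap (fun u =>
          if pvEntry m node u = 1 then
            (((PySem.List.pyRange 0 (m.length : Int) 1).filter (fun j => pvEntry m node j == 1)).filter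
              (fun v => decide (u ≠ v ∧ pvEntry m u v = 0))).map (fun v => (u, node, v))
          else []) := by
        exact List.flatMap_congr (fun u _ => step1 u)
    _ = _ := by
        rw [pv_flatMap_ite]
        congr 1

theorem pv_ports_eq (m : List (List Int)) :
    find_unshielded_triples m = find_unshielded_triples_alt m := by
  simp only [find_unshielded_triples, find_unshielded_triples_alt,
    PySem.List.foldl_append_ite, PySem.List.foldl_append_eq_flatMap, List.nil_append]
  apply List.flatMap_congr
  intro node hnode
  rw [PySem.List.mem_pyRange_one] at hnode
  rw [PySem.List.pyGetD_map_pyRange_of_nonneg _ _ _ _ hnode.1 hnode.2]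
  exact pv_inner_eq m node

-- ===== VERDICT (by name: the statement is the Claim_ definition above) =====
theorem find_unshielded_triples_spec : Claim_equal_find_unshielded_triples := by
  intro m _ _
  unfold Spec_find_unshielded_triples
  exact pv_ports_eq m


-- flatMap of a guarded body over l = flatMap over the filtered list
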